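-- pv_equiv track=rewrite | github.com/Arsen1302/Code-copy-detector | TestData/solutions/problem_1030_4.py | solution_1030_4
-- ===== SOURCE A (Python) =====
-- def solution_1030_4(target: str) -> int:
--     '''
--     Intuition: the min number of flips equals the number of toggles between 0 and 1 starting with 0.
--     prev: previous character (0 at first)
--     '''
--     flips = 0
--     prev = '0'
--     for num in target:
--         if num != prev:
--             flips += 1
--             prev = num
--     return flips
-- ===== SOURCE B (Python) =====
-- def solution_1030_4(target: str) -> int:
--     # Count maximal runs of equal characters in the zero-prefixed string; toggles = runs - 1.
--     s = '0' + target
--     n = len(s)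
--     groups = 0
--     i = 0
--     while i < n:
--         j = i + 1
--         while j < n and s[j] == s[i]:
--             j += 1
--         groups += 1
--         i = j
--     return groups - 1
-- ===== Notes on version B (the rewrite author's own statement) =====
-- stated objective: alternative
-- what changed: B prepends a zero character and counts maximal runs of equal characters by stripping one whole run per outer step, returning runs minus one, instead of A's single per-character loop tracking a prev character with a branch.
import Mathlib
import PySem

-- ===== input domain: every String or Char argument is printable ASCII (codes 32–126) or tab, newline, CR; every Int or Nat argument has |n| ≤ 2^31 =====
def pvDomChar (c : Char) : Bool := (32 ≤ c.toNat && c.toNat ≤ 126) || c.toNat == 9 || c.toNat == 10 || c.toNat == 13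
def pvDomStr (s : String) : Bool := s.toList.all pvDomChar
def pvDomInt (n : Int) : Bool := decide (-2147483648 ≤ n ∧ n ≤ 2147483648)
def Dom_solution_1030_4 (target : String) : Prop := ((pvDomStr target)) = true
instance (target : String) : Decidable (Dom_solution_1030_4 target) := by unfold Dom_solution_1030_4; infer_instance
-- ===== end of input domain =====

-- B replaces A's prev-tracking per-character loop by counting maximal runs of equal characters
-- of the zero-prefixed string, stripping one whole run per step; result = runs - 1.

-- ===== PORT A =====
def solution_1030_4 (target : String) : Int :=
  (target.toList.foldl
    (fun (st : Int × Char) num => if num ≠ st.2 then (st.1 + 1, num) else st)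
    (0, '0')).1

-- ===== PORT B =====
-- Source B's outer while loop (strip the whole leading run, continue on the remainder) as structural
-- recursion; the inner scan for the run end is dropWhile
def pvRuns : List Char → Int
  | [] => 0
  | c :: rest => 1 + pvRuns (rest.dropWhile (· == c))
termination_by l => l.length
decreasing_by
  exact Nat.lt_succ_of_le (List.length_dropWhile_le _ _)

def solution_1030_4_alt (target : String) : Int :=
  pvRuns ('0' :: target.toList) - 1

-- ===== PRECONDITION & SPEC =====
def Spec_solution_1030_4 (target : String) (out : Int) : Prop := out = solution_1030_4_alt target
instance (target : String) (out : Int) : Decidable (Spec_solution_1030_4 target out) := by unfold Spec_solution_1030_4; infer_instance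

-- ===== CLAIM (what is proved, stated in full; the proofs are below) =====
def Claim_equal_solution_1030_4 : Prop := ∀ (target : String), Dom_solution_1030_4 target → Spec_solution_1030_4 target (solution_1030_4 target)

-- ===== LEMMAS AND PROOFS =====
theorem pvRuns_cons (c : Char) (rest : List Char) :
    pvRuns (c :: rest) = 1 + pvRuns (rest.dropWhile (· == c)) := by
  rw [pvRuns]

theorem pv_fold_runs (l : List Char) (flips : Int) (prev : Char) :
    (l.foldl (fun (st : Int × Char) num => if num ≠ st.2 then (st.1 + 1, num) else st)
      (flips, prev)).1 = flips + pvRuns (l.dropWhile (· == prev)) := by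
  induction l generalizing flips prev with
  | nil => simp only [List.foldl_nil, List.dropWhile_nil, pvRuns.eq_def]; simp
  | cons c rest ih =>
    simp only [List.foldl_cons]
    by_cases h : c = prev
    · rw [if_neg (show ¬ c ≠ prev by simp [h]), ih]
      subst h
      simp [List.dropWhile_cons]
    · rw [if_pos (by simpa using h), ih]
      have hd : (c :: rest).dropWhile (· == prev) = c :: rest := by
        simp [List.dropWhile_cons, h]
      rw [hd, pvRuns_cons]
      ring

-- ===== VERDICT (by name: the statement is the Claim_ definition above) =====
theorem solution_1030_4_spec : Claim_equal_solution_1030_4 := by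
  intro target _
  unfold Spec_solution_1030_4 solution_1030_4 solution_1030_4_alt
  rw [pv_fold_runs, pvRuns_cons]
  ring
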